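-- pv_equiv track=rewrite | github.com/duochen/Python-Beginner | LearnToCodeBySolvingProblems/ch9/angry_cows.py | explode_right
-- ===== SOURCE A (Python) =====
-- def explode_right_one(hay_bales, explode_index, radius):
--     """
--     hay_bales is a sorted list of hay bale positions.
--     explode_index is the index of the hay bale that is exploded.
--     radius is the radius of the explosion.
--
--     Return the index of the rightmost hay bale in the radius that explodes.
--     """
--     if explode_index == len(hay_bales) - 1:
--         return explode_index
--     i = explode_index + 1
--     while i < len(hay_bales) and hay_bales[i] - hay_bales[explode_index] <= radius:
--         i = i + 1
--     return i - 1
--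
-- def explode_right(hay_bales, explode_index):
--     """
--     hay_bales is a sorted list of hay bale positions.
--     explode_index is the index of the hay bale that is exploded.
--
--     Return the index of the rightmost hay bale that explodes.
--     """
--     radius = 1
--     done = False
--     while not done:
--         rightmost = explode_right_one(hay_bales, explode_index, radius)
--         if rightmost == explode_index:
--             done = True
--         else:
--             explode_index = rightmost
--             radius = radius + 1
--     return rightmost
-- ===== SOURCE B (Python) =====
-- def explode_right(hay_bales, explode_index):
--     """Chain explosion to the right: at each round, binary-search for the
--     rightmost bale within the current radius instead of scanning linearly."""
--     n = len(hay_bales)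
--     if explode_index >= n - 1:
--         return explode_index
--     j = explode_index
--     radius = 1
--     while True:
--         target = hay_bales[j] + radius
--         lo, hi = j + 1, n
--         while lo < hi:
--             mid = (lo + hi) // 2
--             if hay_bales[mid] <= target:
--                 lo = mid + 1
--             else:
--                 hi = mid
--         k = lo - 1
--         if k == j:
--             return j
--         j = k
--         radius += 1
-- ===== Notes on version B (the rewrite author's own statement) =====
-- stated objective: alternative
-- what changed: Each round's rightmost-bale-within-radius lookup is a hand-rolled bisect_right binary search over the sorted positions (O(log n) per round) instead of A's element-by-element linear scan, with an early return when there is no bale to the right.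
-- outside the precondition, e.g. on explode_right([0, 0, 2, 0], 1): A returns 1, B returns 3; on explode_right([0, 0, 0, 2], -2): A returns -2, B returns 3
import Mathlib
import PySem

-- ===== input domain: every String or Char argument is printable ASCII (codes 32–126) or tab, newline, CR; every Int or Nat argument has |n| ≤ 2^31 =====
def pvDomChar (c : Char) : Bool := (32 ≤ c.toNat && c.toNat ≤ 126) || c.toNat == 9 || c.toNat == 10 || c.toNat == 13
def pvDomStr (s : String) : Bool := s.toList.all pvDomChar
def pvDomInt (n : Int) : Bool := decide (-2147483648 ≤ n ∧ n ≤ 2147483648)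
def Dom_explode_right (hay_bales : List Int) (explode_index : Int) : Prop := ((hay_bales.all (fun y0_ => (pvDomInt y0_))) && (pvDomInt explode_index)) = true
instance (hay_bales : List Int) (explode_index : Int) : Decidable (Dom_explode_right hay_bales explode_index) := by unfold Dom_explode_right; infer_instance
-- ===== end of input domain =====

-- B replaces each round's linear rightmost-within-radius scan by a hand-rolled
-- binary search over the sorted positions (objective: alternative algorithm).


-- ===== PORT A =====
-- inner while loop of explode_right_one; list accesses use pyGet?, the getD 0
-- default is only reached on indices where Python would raise (outside Pre_)
def scanA (hay : List Int) (base radius i : Int) : Int :=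
  if h : i < (hay.length : Int) ∧ (PySem.List.pyGet? hay i).getD 0 - (PySem.List.pyGet? hay base).getD 0 ≤ radius then
    scanA hay base radius (i + 1)
  else
    i - 1
termination_by ((hay.length : Int) - i).toNat
decreasing_by omega

def explode_right_one (hay : List Int) (explode_index radius : Int) : Int :=
  if explode_index = (hay.length : Int) - 1 then explode_index
  else scanA hay explode_index radius (explode_index + 1)

-- outer while-not-done loop; fuel hay.length + 1 bounds the number of rounds
-- (each non-final round strictly increases explode_index, which stays < length)
def loopA (hay : List Int) (explode_index radius : Int) : Nat → Int
  | 0 => explode_index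
  | fuel + 1 =>
    let rightmost := explode_right_one hay explode_index radius
    if rightmost = explode_index then rightmost
    else loopA hay rightmost (radius + 1) fuel

def explode_right (hay_bales : List Int) (explode_index : Int) : Int :=
  loopA hay_bales explode_index 1 (hay_bales.length + 1)

-- ===== PORT B =====
-- midpoint bounds for the binary search (cited by bisectB's termination proof)
theorem pvMidBounds (lo hi : Int) (h : lo < hi) :
    lo ≤ PySem.Int.floordiv (lo + hi) 2 ∧ PySem.Int.floordiv (lo + hi) 2 < hi := by
  constructor
  · rw [PySem.Int.le_floordiv_iff_mul_le (by omega)]; omega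
  · rw [PySem.Int.floordiv_lt_iff_lt_mul (by omega)]; omega

-- hand-rolled bisect_right over hay[lo:hi]
def bisectB (hay : List Int) (target lo hi : Int) : Int :=
  if h : lo < hi then
    let mid := PySem.Int.floordiv (lo + hi) 2
    if (PySem.List.pyGet? hay mid).getD 0 ≤ target then bisectB hay target (mid + 1) hi
    else bisectB hay target lo mid
  else lo
termination_by (hi - lo).toNat
decreasing_by
  all_goals have := pvMidBounds lo hi (by omega); omega

-- the while True loop; same fuel bound as A's outer loop
def loopB (hay : List Int) (j radius : Int) : Nat → Int
  | 0 => j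
  | fuel + 1 =>
    let target := (PySem.List.pyGet? hay j).getD 0 + radius
    let k := bisectB hay target (j + 1) hay.length - 1
    if k = j then j
    else loopB hay k (radius + 1) fuel

def explode_right_alt (hay_bales : List Int) (explode_index : Int) : Int :=
  if explode_index ≥ (hay_bales.length : Int) - 1 then explode_index
  else loopB hay_bales explode_index 1 (hay_bales.length + 1)

-- ===== PRECONDITION & SPEC =====
-- Pre_ keeps the function's documented domain: hay_bales sorted (stated in A's
-- docstring; on unsorted input A's stop-at-first-gap scan result is an accident
-- of input order that a binary search cannot and should not reproduce) and a
-- nonnegative explode_index (negative indices make A read the base bale via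
-- Python wraparound while the cursor re-enters the list at 0, an artefact no
-- caller would specify, and indices below -len raise IndexError); indices at
-- or beyond len-1 are admitted unconditionally, both programs return them as is.
def Pre_explode_right (hay_bales : List Int) (explode_index : Int) : Prop :=
  (hay_bales.length : Int) - 1 ≤ explode_index ∨
    (0 ≤ explode_index ∧ List.Pairwise (· ≤ ·) hay_bales)
instance (hay_bales : List Int) (explode_index : Int) : Decidable (Pre_explode_right hay_bales explode_index) := by unfold Pre_explode_right; infer_instance

def pvWitness_explode_right : List Int × Int := ([1, 2, 4, 8], 0)

def Spec_explode_right (hay_bales : List Int) (explode_index : Int) (out : Int) : Prop := out = explode_right_alt hay_bales explode_index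
instance (hay_bales : List Int) (explode_index : Int) (out : Int) : Decidable (Spec_explode_right hay_bales explode_index out) := by unfold Spec_explode_right; infer_instance

-- ===== CLAIM (what is proved, stated in full; the proofs are below) =====
def Claim_equal_explode_right : Prop := ∀ (hay_bales : List Int) (explode_index : Int), Dom_explode_right hay_bales explode_index → Pre_explode_right hay_bales explode_index → Spec_explode_right hay_bales explode_index (explode_right hay_bales explode_index)

-- ===== LEMMAS AND PROOFS =====

-- boundary characterisation shared by the linear scan and the binary search:
-- m is the least index in [lo, hi] that fails P (or hi if none fails)
def IsBd (P : Int → Prop) (lo hi m : Int) : Prop :=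
  lo ≤ m ∧ m ≤ hi ∧ (∀ a, lo ≤ a → a < m → P a) ∧ (m = hi ∨ ¬ P m)

theorem IsBd_unique {P : Int → Prop} {lo hi m₁ m₂ : Int}
    (h₁ : IsBd P lo hi m₁) (h₂ : IsBd P lo hi m₂) : m₁ = m₂ := by
  obtain ⟨l₁, u₁, pre₁, end₁⟩ := h₁
  obtain ⟨l₂, u₂, pre₂, end₂⟩ := h₂
  by_contra hne
  rcases lt_or_gt_of_ne hne with h | h
  · rcases end₁ with rfl | hnp
    · omega
    · exact hnp (pre₂ m₁ l₁ h)
  · rcases end₂ with rfl | hnp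
    · omega
    · exact hnp (pre₁ m₂ l₂ h)

theorem scanA_isBd (hay : List Int) (base radius : Int) (i : Int)
    (hi : i ≤ (hay.length : Int)) :
    IsBd (fun m => (PySem.List.pyGet? hay m).getD 0 - (PySem.List.pyGet? hay base).getD 0 ≤ radius)
      i (hay.length : Int) (scanA hay base radius i + 1) := by
  rw [scanA]
  split
  · next h =>
    have ih := scanA_isBd hay base radius (i + 1) (by omega)
    obtain ⟨l, u, pre, e⟩ := ih
    refine ⟨by omega, u, ?_, e⟩
    intro a ha hlt
    by_cases hai : a = i
    · subst hai; exact h.2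
    · exact pre a (by omega) hlt
  · next h =>
    push Not at h
    have hii : i - 1 + 1 = i := by omega
    rw [hii]
    refine ⟨by omega, hi, fun a h1 h2 => absurd h1 (by omega), ?_⟩
    by_cases hn : i = (hay.length : Int)
    · exact Or.inl hn
    · right
      intro hc
      have := h (by omega)
      omega
termination_by ((hay.length : Int) - i).toNat
decreasing_by omega

theorem bisectB_isBd (hay : List Int) (target lo hi : Int)
    (hle : lo ≤ hi)
    (hdc : ∀ a b, lo ≤ a → a ≤ b → b < hi →
      (PySem.List.pyGet? hay b).getD 0 ≤ target → (PySem.List.pyGet? hay a).getD 0 ≤ target) :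
    IsBd (fun m => (PySem.List.pyGet? hay m).getD 0 ≤ target) lo hi
      (bisectB hay target lo hi) := by
  rw [bisectB]
  split
  · next h =>
    have hmid := pvMidBounds lo hi h
    dsimp only
    set mid := PySem.Int.floordiv (lo + hi) 2 with hmiddef
    split
    · next hp =>
      have ih := bisectB_isBd hay target (mid + 1) hi (by omega)
        (fun a b ha hab hb => hdc a b (by omega) hab hb)
      obtain ⟨l, u, pre, e⟩ := ih
      refine ⟨by omega, u, ?_, e⟩
      intro a ha hlt
      by_cases ham : a ≤ mid
      · exact hdc a mid ha ham hmid.2 hp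
      · exact pre a (by omega) hlt
    · next hp =>
      have ih := bisectB_isBd hay target lo mid (by omega)
        (fun a b ha hab hb => hdc a b ha hab (by omega))
      obtain ⟨l, u, pre, e⟩ := ih
      refine ⟨l, by omega, pre, Or.inr ?_⟩
      rcases e with hm | hnp
      · rw [hm]; exact hp
      · exact hnp
  · next h =>
    exact ⟨by omega, by omega, by omega, Or.inl (by omega)⟩
termination_by (hi - lo).toNat
decreasing_by all_goals omega

-- sortedness gives the downward-closure hypothesis of bisectB_isBd
theorem sorted_le (hay : List Int) (hs : List.Pairwise (· ≤ ·) hay)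
    (a b : Int) (h0 : 0 ≤ a) (hab : a ≤ b) (hb : b < (hay.length : Int)) :
    (PySem.List.pyGet? hay a).getD 0 ≤ (PySem.List.pyGet? hay b).getD 0 := by
  have ha' : a.toNat < hay.length := by omega
  have hb' : b.toNat < hay.length := by omega
  rw [PySem.List.pyGet?_eq_some_getElem hay (i := a) (by omega) (by omega),
      PySem.List.pyGet?_eq_some_getElem hay (i := b) (by omega) hb]
  simp only [Option.getD_some]
  by_cases heq : a = b
  · subst heq; exact le_refl _
  · exact List.pairwise_iff_getElem.mp hs a.toNat b.toNat ha' hb' (by omega)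

-- one round of A equals one round of B
theorem step_eq (hay : List Int) (hs : List.Pairwise (· ≤ ·) hay)
    (j radius : Int) (h0 : 0 ≤ j) (hj : j ≤ (hay.length : Int) - 1) :
    explode_right_one hay j radius
      = bisectB hay ((PySem.List.pyGet? hay j).getD 0 + radius) (j + 1) hay.length - 1 := by
  have hb := bisectB_isBd hay ((PySem.List.pyGet? hay j).getD 0 + radius) (j + 1) hay.length
    (by omega)
    (fun a b ha hab hblt hble => le_trans (sorted_le hay hs a b (by omega) hab hblt) hble)
  unfold explode_right_one
  split
  · next he =>
    -- j = length - 1: the search window [j+1, length) is empty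
    obtain ⟨l, u, _, _⟩ := hb
    omega
  · next he =>
    have ha := scanA_isBd hay j radius (j + 1) (by omega)
    have heq : IsBd (fun m => (PySem.List.pyGet? hay m).getD 0 ≤ (PySem.List.pyGet? hay j).getD 0 + radius)
        (j + 1) (hay.length : Int) (scanA hay j radius (j + 1) + 1) := by
      obtain ⟨l, u, pre, e⟩ := ha
      refine ⟨l, u, ?_, ?_⟩
      · intro a h1 h2
        have := pre a h1 h2
        omega
      · rcases e with h | h
        · exact Or.inl h
        · right
          intro hc
          apply h
          omega
    have := IsBd_unique heq hb
    omega

-- bounds for the next round's state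
theorem step_bounds (hay : List Int) (j radius : Int)
    (h0 : 0 ≤ j) (hj : j ≤ (hay.length : Int) - 1) :
    j ≤ explode_right_one hay j radius ∧
      explode_right_one hay j radius ≤ (hay.length : Int) - 1 := by
  unfold explode_right_one
  split
  · omega
  · have := scanA_isBd hay j radius (j + 1) (by omega)
    obtain ⟨l, u, _, _⟩ := this
    omega

theorem loop_eq (hay : List Int) (hs : List.Pairwise (· ≤ ·) hay) :
    ∀ (fuel : Nat) (j radius : Int), 0 ≤ j → j ≤ (hay.length : Int) - 1 →
      loopA hay j radius fuel = loopB hay j radius fuel := by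
  intro fuel
  induction fuel with
  | zero => intro j radius _ _; rfl
  | succ f ih =>
    intro j radius h0 hj
    simp only [loopA, loopB]
    rw [← step_eq hay hs j radius h0 hj]
    have hb := step_bounds hay j radius h0 hj
    split
    · next h => simp [h]
    · next h =>
      exact ih _ _ (by omega) (by omega)

-- ===== VERDICT (by name: the statement is the Claim_ definition above) =====
theorem explode_right_spec : Claim_equal_explode_right := by
  intro hay ei _ hpre
  unfold Spec_explode_right explode_right explode_right_alt
  by_cases hge : ei ≥ (hay.length : Int) - 1
  · rw [if_pos hge]
    -- A's first round makes no progress, so loopA returns ei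
    simp only [loopA]
    have hone : explode_right_one hay ei 1 = ei := by
      unfold explode_right_one
      split
      · rfl
      · next hne =>
        rw [scanA]
        rw [dif_neg (by push Not; intro hlt; omega)]
        omega
    simp [hone]
  · obtain ⟨h0, hs⟩ : 0 ≤ ei ∧ List.Pairwise (· ≤ ·) hay := by
      rcases hpre with h | h
      · omega
      · exact h
    rw [if_neg hge]
    exact loop_eq hay hs _ ei 1 h0 (by omega)
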